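/- GENERATED by mk_final_copies.py from the proof of the farm's unit `codebook_decode_scalar_raw.2` (farm:codebook_decode_scalar_raw.2.1: Lemmas.lean) as the
   re-elaboration sweep compiled it — do not edit. -/
/-
  Unit codebook_decode_scalar_raw.2 (the binary search of codebook_decode_scalar_raw): the pure facts, the carried assertion, the
  loop-head assertion `AtSearchHead`, and the first two stages of the walk (`pre_ok`: entry … loop head; `loop_ok`: the loop).
  The third stage (`tail_ok`) and the unit's theorem are in Proof.lean.
-/
import Asan.CheckWalk
import Vorbis.Spec.Units.codebook_decode_scalar_raw_2

open X86 X86.User Asan Vorbis Vorbis.Spec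

set_option maxRecDepth 4000
set_option maxHeartbeats 4000000

namespace Vorbis.Spec.codebook_decode_scalar_raw_2

/-- The low half of the word of a small number is the number. -/
theorem part32_addr_toNat (n : Nat) (h : n < 2 ^ 32) : (Word.part .w32 (addr n)).toNat = n := by
  rw [Asan.part32_toNat, toNat_addr _ (by omega)]
  exact Nat.mod_eq_of_lt h

/-- … and so is its signed value, below `2^31` (the form of the walker's signed comparisons). -/
theorem part32_addr_toInt (n : Nat) (h : n < 2 ^ 31) : (Word.part .w32 (addr n)).toInt = (n : Int) := by
  rw [toInt_of_lt _ (by rw [part32_addr_toNat n (by omega)]; exact h), part32_addr_toNat n (by omega)]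

/-- Two words with the same number are the same word. -/
theorem word_eq_addr (w : Word) (n : Nat) (h : w.toNat = n) : w = addr n :=
  eq_addr w n h

/-- `sar r32, 1` of a non-negative `int`: the half. -/
theorem sar1_addr (n : Nat) (h : n < 2 ^ 31) :
    Word.ofBV ((Word.part .w32 (addr n)).sshiftRight 1) = addr (n / 2) := by
  apply eq_addr
  have hm : (Word.part .w32 (addr n)).msb = false := by
    rw [BitVec.msb_eq_decide, part32_addr_toNat n (by omega)]
    simp only [decide_eq_false_iff_not, Nat.not_le]
    omega
  rw [toNat_ofBV32, BitVec.toNat_sshiftRight_of_msb_false hm, part32_addr_toNat n (by omega), Nat.shiftRight_eq_div_pow]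

/-- `lea r32, [a + b]` of two small numbers: the sum. -/
theorem lea32_addr (a b : Nat) (h : a + b < 2 ^ 32) :
    Word.ofBV (BitVec.setWidth 32 (addr a + addr b).toBitVec) = addr (a + b) := by
  apply eq_addr
  rw [toNat_ofBV32, BitVec.toNat_setWidth, UInt64.toNat_toBitVec, UInt64.toNat_add, toNat_addr _ (by omega),
    toNat_addr _ (by omega)]
  omega

/-- `sub r32, (r32 >> 1)`: `n − n / 2`. -/
theorem sub_half_addr (n : Nat) (h : n < 2 ^ 31) :
    Word.ofBV (Word.part .w32 (addr n) - (Word.part .w32 (addr n)).sshiftRight 1) = addr (n - n / 2) := by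
  apply eq_addr
  have hm : (Word.part .w32 (addr n)).msb = false := by
    rw [BitVec.msb_eq_decide, part32_addr_toNat n (by omega)]
    simp only [decide_eq_false_iff_not, Nat.not_le]
    omega
  rw [toNat_ofBV32, BitVec.toNat_sub, BitVec.toNat_sshiftRight_of_msb_false hm, part32_addr_toNat n (by omega),
    Nat.shiftRight_eq_div_pow]
  omega

/-- `sub r32, r32` of two small numbers in order. -/
theorem sub32_addr (a b : Nat) (hb : b ≤ a) (ha : a < 2 ^ 32) :
    Word.ofBV (Word.part .w32 (addr a) - Word.part .w32 (addr b)) = addr (a - b) := by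
  apply eq_addr
  rw [toNat_ofBV32, BitVec.toNat_sub, part32_addr_toNat a ha, part32_addr_toNat b (by omega)]
  omega

/-- `mov r32, r32` of a small number. -/
theorem mov32_addr (n : Nat) (h : n < 2 ^ 32) : Word.ofBV (Word.part .w32 (addr n)) = addr n := by
  apply eq_addr
  rw [toNat_ofBV32, part32_addr_toNat n h]

/-- The address of word `m` of a table at `p`, as the walker builds it (`movsxd ; shl 2 ; add [ptr]`). -/
theorem elem4_toNat (m p : Nat) (hm : m < 2 ^ 31) (hp : p + 4 * m < 2 ^ 64) :
    (Word.ofBV (BitVec.signExtend 64 (Word.part .w32 (addr m))) <<< 2 + UInt64.ofNat p).toNat = p + 4 * m := by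
  have e : (addr m).toNat % 2 ^ 32 = m := by
    rw [toNat_addr _ (by omega)]
    exact Nat.mod_eq_of_lt (by omega)
  rw [sext32_shl2_add (addr m) p (by omega) (by omega), e]

/-- The address of byte `x` of a table at `p` (`movsxd ; add [ptr]`). -/
theorem elem1_toNat (x p : Nat) (hx : x < 2 ^ 31) (hp : p + x < 2 ^ 64) :
    (Word.ofBV (BitVec.signExtend 64 (Word.part .w32 (addr x))) + UInt64.ofNat p).toNat = p + x := by
  have e : (addr x).toNat % 2 ^ 32 = x := by
    rw [toNat_addr _ (by omega)]
    exact Nat.mod_eq_of_lt (by omega)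
  have ep : (UInt64.ofNat p).toNat = p := toNat_addr p (by omega)
  rw [sext32_add (addr x) (UInt64.ofNat p) (by omega) (by omega), e, ep]

/-- The address of byte `y` of a table at `p`, `y` a loaded `int` (`mov r32, [m] ; movsxd ; add [ptr]`). -/
theorem elem1_ofNat_toNat (y p : Nat) (hy : y < 2 ^ 31) (hp : p + y < 2 ^ 64) :
    (Word.ofBV (BitVec.signExtend 64 (BitVec.ofNat 32 y)) + UInt64.ofNat p).toNat = p + y := by
  have ep : (UInt64.ofNat p).toNat = p := toNat_addr p (by omega)
  have ey : (BitVec.ofNat 32 y).toNat = y := toNat_ofNat32 y (by omega)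
  rw [UInt64.toNat_add, toNat_sext32 _ (by omega), ey, ep]
  omega

/-- A loaded `int` below `2^31`, zero-extended into a register, as a 32-bit argument. -/
theorem argInt_ofNat32 (y : Nat) (hy : y < 2 ^ 31) : argInt (Word.ofBV (BitVec.ofNat 32 y)) = (y : Int) := by
  have ey : (BitVec.ofNat 32 y).toNat = y := toNat_ofNat32 y (by omega)
  unfold argInt
  rw [toNat_ofBV32, ey, Nat.mod_eq_of_lt (by omega)]
  unfold sint32
  rw [if_pos (by omega)]

/-- A small number in a register, as a 32-bit argument. -/
theorem argInt_addr (x : Nat) (hx : x < 2 ^ 31) : argInt (addr x) = (x : Int) := by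
  unfold argInt
  rw [toNat_addr _ (by omega), Nat.mod_eq_of_lt (by omega)]
  unfold sint32
  rw [if_pos (by omega)]

/-- `mov r12d, 0xffffffff`: the `int` −1. -/
theorem argInt_m1 : argInt (Word.ofBV 0xffffffff#32) = -1 := by
  decide


/-! ### What the exit assertion carries, over the segment's stores -/

/-- Where the stack frame of the function and `*f` are: the frame `[rsp − 384, rsp + 8)` lies in the stack region, `*f` off it
and below the shadow. (`sp` = the stack pointer at the function's entry, as a number.) -/
structure Geo (sp f : Nat) : Prop where
  room : 0x700000 + 384 ≤ sp
  top : sp + 8 ≤ 0x800000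
  obj_off : f + 1808 + 384 ≤ sp ∨ sp + 8 ≤ f
  obj_hi : f + 1808 ≤ 0xC00000

/-- **The memory-dependent part of `ScalarRaw.AtExit`** (= of `Mid` and the reader's post) for a memory `m` reached from the
entry state `e`: the return address and the six saved registers in their slots, the contract's footprint, no shadow byte written,
`Bits f` with μ not increased. -/
structure Carried (others : List Obj) (frames : List (Nat × FrameLayout)) (Blk : Block → Prop) (len : Nat) (ret : Word)
    (e : State) (f : Nat) (m : Mem) : Prop where
  ra : UInt64.ofNat (m.readLE (e.reg .rsp) 8) = ret
  r15 : UInt64.ofNat (m.readLE (e.reg .rsp - 8) 8) = e.reg .r15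
  r14 : UInt64.ofNat (m.readLE (e.reg .rsp - 16) 8) = e.reg .r14
  r13 : UInt64.ofNat (m.readLE (e.reg .rsp - 24) 8) = e.reg .r13
  r12 : UInt64.ofNat (m.readLE (e.reg .rsp - 32) 8) = e.reg .r12
  rbp : UInt64.ofNat (m.readLE (e.reg .rsp - 40) 8) = e.reg .rbp
  rbx : UInt64.ofNat (m.readLE (e.reg .rsp - 48) 8) = e.reg .rbx
  same : Mem.SameExcept ((codebook_decode_scalar_raw.spec others frames Blk len).footprint e) e.mem m
  untouched : ShadowUntouched e.mem m
  reader : ReaderPost Blk len e.mem m f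

namespace Carried
variable {others : List Obj} {frames : List (Nat × FrameLayout)} {Blk : Block → Prop} {len : Nat} {ret : Word} {e : State}
  {f : Nat} {m m' : Mem}

/-- A slot of the frame above `rsp − 48` reads the same when the memories agree there. -/
theorem slot_frame {x : Word} (k : Nat) (hk : k ≤ 48) (hsp : 384 ≤ (e.reg .rsp).toNat) (hsp2 : (e.reg .rsp).toNat + 8 < 2 ^ 64)
    (h : UInt64.ofNat (m.readLE (e.reg .rsp - UInt64.ofNat k) 8) = x)
    (he : Mem.EqOn ((e.reg .rsp).toNat - 48) ((e.reg .rsp).toNat + 8) m m') :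
    UInt64.ofNat (m'.readLE (e.reg .rsp - UInt64.ofNat k) 8) = x := by
  have ek : (UInt64.ofNat k).toNat = k := toNat_addr k (by omega)
  have ea : (e.reg .rsp - UInt64.ofNat k).toNat = (e.reg .rsp).toNat - k := by
    rw [UInt64.toNat_sub_of_le _ _ (by rw [UInt64.le_iff_toNat_le, ek]; omega), ek]
  refine Mem.ofNat_readLE_frame h (he.mono ?_ ?_) ?_
  · rw [ea]
    omega
  · rw [ea]
    omega
  · rw [ea]
    omega

/-- **The memories agree on the saved slots, on the shadow and on `*f`, and differ only inside the footprint**: everything carried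
survives. -/
theorem of_agree (h : Carried others frames Blk len ret e f m) (hg : Geo (e.reg .rsp).toNat f)
    (hslots : Mem.EqOn ((e.reg .rsp).toNat - 48) ((e.reg .rsp).toNat + 8) m m')
    (hsame : Mem.SameExcept ((codebook_decode_scalar_raw.spec others frames Blk len).footprint e) e.mem m')
    (hsh : ShadowUntouched m m') (hr : ReaderPost Blk len m m' f) :
    Carried others frames Blk len ret e f m' := by
  have hroom := hg.room
  have htop := hg.top
  refine ⟨?_, ?_, ?_, ?_, ?_, ?_, ?_, hsame, Mem.EqOn.trans h.untouched hsh, h.reader.trans hr⟩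
  · exact Mem.ofNat_readLE_frame h.ra (hslots.mono (by omega) (by omega)) (by omega)
  · exact slot_frame 8 (by omega) (by omega) (by omega) h.r15 hslots
  · exact slot_frame 16 (by omega) (by omega) (by omega) h.r14 hslots
  · exact slot_frame 24 (by omega) (by omega) (by omega) h.r13 hslots
  · exact slot_frame 32 (by omega) (by omega) (by omega) h.r12 hslots
  · exact slot_frame 40 (by omega) (by omega) (by omega) h.rbp hslots
  · exact slot_frame 48 (by omega) (by omega) (by omega) h.rbx hslots

/-- **Stores into the function's own frame below the saved registers** (the spills at `[rsp+10H]`, `[rsp+18H]`, the return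
addresses of the check calls and of bit_reverse; also the unknown number of them a loop makes): a memory that differs only inside
windows `ws ⊆ [rsp − 384, rsp − 48)`. -/
theorem stack (h : Carried others frames Blk len ret e f m) (hg : Geo (e.reg .rsp).toNat f) {ws : List Span}
    (hs : Mem.SameExcept ws m m')
    (hws : ∀ w, w ∈ ws → (e.reg .rsp).toNat - 384 ≤ w.lo ∧ w.hi ≤ (e.reg .rsp).toNat - 48) :
    Carried others frames Blk len ret e f m' := by
  have hroom := hg.room
  have htop := hg.top
  have hoff := hg.obj_off
  have hhi := hg.obj_hi
  have hbits := h.reader.bits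
  have hobj : Mem.EqOn f (f + 1808) m m' := by
    apply hs.eqOn
    intro w hw
    have := hws w hw
    omega
  refine h.of_agree hg ?_ ?_ ?_ ?_
  · apply hs.eqOn
    intro w hw
    have := hws w hw
    omega
  · apply h.same.step_same hs
    intro w hw a h1 h2
    have := hws w hw
    refine ⟨⟨(e.reg .rsp).toNat - 384, (e.reg .rsp).toNat⟩, List.mem_cons_self, ?_, ?_⟩
    · show (e.reg .rsp).toNat - 384 ≤ a
      omega
    · show a < (e.reg .rsp).toNat
      omega
  · apply hs.eqOn
    intro w hw
    have := hws w hw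
    omega
  · have hsame : (objBlock f).Same m m' := hobj
    exact ⟨hbits.frame_fields (Bits.SameFields.of_same hsame), Nat.le_of_eq (mu_frame_obj (by omega) hsame)⟩

/-- One store into the own frame below the saved registers. -/
theorem stack_store (h : Carried others frames Blk len ret e f m) (hg : Geo (e.reg .rsp).toNat f) (w : Word) (k v : Nat)
    (h1 : (e.reg .rsp).toNat - 384 ≤ w.toNat) (h2 : w.toNat + k ≤ (e.reg .rsp).toNat - 48) :
    Carried others frames Blk len ret e f (m.writeLE w k v) := by
  have htop := hg.top
  refine h.stack hg (ws := [⟨w.toNat, w.toNat + k⟩]) ?_ ?_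
  · exact Mem.SameExcept.writeLE _ m w k v (by omega) ⟨_, List.mem_cons_self, Nat.le_refl _, Nat.le_refl _⟩
  · intro w' hw'
    have e1 : w' = ⟨w.toNat, w.toNat + k⟩ := List.mem_singleton.mp hw'
    subst e1
    exact ⟨h1, h2⟩

/-- A store of `k` bytes at offset `off` of `*f` inside the window `[f + 1752, f + 1784)` of the footprint (`acc`, `valid_bits`):
everything but the reader's clause. -/
theorem obj_store (h : Carried others frames Blk len ret e f m) (hg : Geo (e.reg .rsp).toNat f) (hf : (e.reg .rdi).toNat = f)
    (off k v : Nat) (h1 : 1752 ≤ off) (h2 : off + k ≤ 1784)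
    (hr : ReaderPost Blk len m (m.writeLE (addr (f + off)) k v) f) :
    Carried others frames Blk len ret e f (m.writeLE (addr (f + off)) k v) := by
  have hroom := hg.room
  have htop := hg.top
  have hoff := hg.obj_off
  have hhi := hg.obj_hi
  have ea : (addr (f + off)).toNat = f + off := toNat_addr _ (by omega)
  refine h.of_agree hg ?_ ?_ ?_ hr
  · have := Mem.eqOn_writeLE m (addr (f + off)) k v ((e.reg .rsp).toNat - 48) 56 (by omega) (by omega)
    refine this.mono (Nat.le_refl _) (by omega)
  · refine h.same.step_writeLE _ k v (by omega) ?_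
    refine ⟨⟨f + 1752, f + 1784⟩, ?_, ?_, ?_⟩
    · simp only [X86.User.Spec.footprint, vspec, hf, List.mem_cons, true_or, or_true]
    · show f + 1752 ≤ (addr (f + off)).toNat
      omega
    · show (addr (f + off)).toNat + k ≤ f + 1784
      omega
  · have := Mem.eqOn_writeLE m (addr (f + off)) k v 0xC00000 0x200000 (by omega) (by omega)
    exact this

/-- `mov [r15 + 0x6e4], eax`: the store of `f->acc`. -/
theorem store_acc (h : Carried others frames Blk len ret e f m) (hg : Geo (e.reg .rsp).toNat f) (hf : (e.reg .rdi).toNat = f)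
    (v : Nat) : Carried others frames Blk len ret e f (m.writeLE (addr f + 1764) 4 v) := by
  have hbits := h.reader.bits
  rw [addr_add_lit]
  refine h.obj_store hg hf 1764 4 v (by omega) (by omega) ⟨?_, ?_⟩
  · exact hbits.store_other 1764 4 v (by omega) (by omega) (by omega) (by omega) (by omega)
  · exact Nat.le_of_eq (hbits.mu_store_other 1764 4 v (by omega) (by omega) (by omega) (by omega) (by omega) (by omega))

/-- `mov [r15 + 0x6e8], r32`: the store of a `valid_bits` that satisfies V1. -/
theorem store_vb (h : Carried others frames Blk len ret e f m) (hg : Geo (e.reg .rsp).toNat f) (hf : (e.reg .rdi).toNat = f)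
    (x : BitVec 32) (hx : -1 ≤ x.toInt ∧ x.toInt ≤ 32) :
    Carried others frames Blk len ret e f (m.writeLE (addr f + 1768) 4 x.toNat) := by
  have hbits := h.reader.bits
  rw [addr_add_lit]
  refine h.obj_store hg hf 1768 4 x.toNat (by omega) (by omega) ⟨?_, ?_⟩
  · exact (hbits.store_valid_bits x hx).1
  · exact Nat.le_of_eq (hbits.mu_store_other 1768 4 x.toNat (by omega) (by omega) (by omega) (by omega) (by omega) (by omega))

end Carried

/-! ### What the entry assertion `AtBinary` gives -/

/-- Where a range inside an allocated block is: above the text, in the data space, off the stack below `top`. -/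
theorem blk_range_where {others : List Obj} {frames : List (Nat × FrameLayout)} {Blk : Block → Prop} {top : Nat} {mem : Mem}
    (hL : BlkLive Blk (Live (stackObjs frames ++ others))) (hinv : ShadowInv others frames top mem)
    (hoff : ∀ o, o ∈ others → L.textHi ≤ o.base) (htop : 0x700000 < top) {B : Block} (hB : Blk B) (a n : Nat)
    (hn : 1 ≤ n) (hin : B.contains a n) :
    0x119d40 ≤ a ∧ a + n ≤ 0xC00000 ∧ (top ≤ a ∨ a + n ≤ 0x700000 ∨ 0x800000 ≤ a) := by
  simp only [vblock] at hin
  have hw := blk_where hL hinv hoff htop hB (by omega)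
  have e : L.textHi = 0x119d40 := rfl
  omega

/-- **The numbers of the segment**, from the precondition at the function's entry and the room of its frame: where `*f`, the
struct `*c` and the frame are. -/
structure Facts (others : List Obj) (frames : List (Nat × FrameLayout)) (Blk : Block → Prop) (len : Nat) (e : State)
    (f c : Nat) : Prop where
  geo : Geo (e.reg .rsp).toNat f
  align : (e.reg .rsp).toNat % 8 = 0
  obj_lo : 0x119d40 ≤ f
  book_lo : 0x119d40 ≤ c
  book_hi : c + 2120 ≤ 0xC00000
  book_off : c + 2120 + 384 ≤ (e.reg .rsp).toNat ∨ (e.reg .rsp).toNat + 8 ≤ c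
  /-- an allocated block off the frame -/
  blk_off : ∀ B a n, Blk B → 1 ≤ n → B.contains a n →
    0x119d40 ≤ a ∧ a + n ≤ 0xC00000 ∧ (a + n + 384 ≤ (e.reg .rsp).toNat ∨ (e.reg .rsp).toNat + 8 ≤ a)

/-- The numbers of the segment from `BookPre` at the entry and the frame's room. -/
theorem facts_of {others : List Obj} {frames : List (Nat × FrameLayout)} {Blk : Block → Prop} {len : Nat} {e : State} {f c : Nat}
    (hpre : BookPre others frames Blk len e) (hf : (e.reg .rdi).toNat = f) (hc : (e.reg .rsi).toNat = c)
    (hroom : 7340032 + 384 ≤ (e.reg .rsp).toNat) (htop : (e.reg .rsp).toNat + 8 ≤ 8388608)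
    (halign : (e.reg .rsp).toNat % 8 = 0) : Facts others frames Blk len e f c := by
  have hsh := hpre.reader.shadow
  have hL := hpre.reader.env.live
  have hwf := hpre.reader.where_obj
  obtain ⟨Bc, hBc, hinc⟩ := hpre.book
  rw [hf] at hwf
  rw [hc] at hinc
  have hwc := blk_range_where hL hsh.inv hsh.offText (by omega) hBc c Off.sizeof.Codebook (by simp only [voff]; omega) hinc
  simp only [voff] at hwc
  refine ⟨⟨hroom, htop, by omega, by omega⟩, halign, by omega, by omega, by omega, by omega, ?_⟩
  intro B a n hB hn hin
  have hw := blk_range_where hL hsh.inv hsh.offText (by omega) hB a n hn hin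
  omega

/-- **`N(c)` reads the same at the function's entry as now**: the footprint so far (the frame, windows of `*f`) does not meet the
struct at `c`. The result range of the exit assertion is stated in the entry memory. -/
theorem N_entry {others : List Obj} {frames : List (Nat × FrameLayout)} {Blk : Block → Prop} {len : Nat} {e : State} {f c : Nat}
    {m : Mem} (hpre : BookPre others frames Blk len e) (hf : (e.reg .rdi).toNat = f) (hc : (e.reg .rsi).toNat = c)
    (hF : Facts others frames Blk len e f c)
    (hsame : Mem.SameExcept ((codebook_decode_scalar_raw.spec others frames Blk len).footprint e) e.mem m) :
    Codebook.N m c = Codebook.N e.mem c := by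
  have hd := hpre.apart.book
  rw [hf, hc] at hd
  simp only [vblock, voff] at hd
  have hroom := hF.geo.room
  have hoff := hF.book_off
  have hhi := hF.book_hi
  have hk : (Codebook.block c).Kept e.mem m := by
    apply Block.Kept.of_sameExcept hsame
    · intro w hw
      simp only [X86.User.Spec.footprint, vspec, hf, List.mem_cons, List.mem_nil_iff, or_false] at hw
      simp only [voff]
      rcases hw with rfl | rfl | rfl | rfl | rfl | rfl <;> simp only [] <;> omega
    · simp only [voff]
      omega
  exact (Codebook.SameFields.of_kept hk).N

/-- Both cases of the signed value of a 32-bit vector, for `omega`. -/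
theorem toInt_cases32 (z : BitVec 32) :
    (z.toNat < 2 ^ 31 ∧ z.toInt = (z.toNat : Int)) ∨ (2 ^ 31 ≤ z.toNat ∧ z.toInt = (z.toNat : Int) - 2 ^ 32) := by
  rw [BitVec.toInt_eq_toNat_cond]
  have := z.isLt
  split <;> omega

/-- **V1 after the bits are consumed**: `valid_bits − len` for `0 ≤ len ≤ 255` (a zero-extended byte, in the walker's form) and
`len ≤ valid_bits ≤ 32`. -/
theorem valid_bits_consumed (v : BitVec 32) (b : BitVec 8) (h1 : -1 ≤ v.toInt) (h2 : v.toInt ≤ 32)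
    (h : ¬ v.toInt < (BitVec.zeroExtend 32 (BitVec.setWidth 8 (BitVec.zeroExtend 32 b))).toInt) :
    -1 ≤ (v - BitVec.zeroExtend 32 (BitVec.setWidth 8 (BitVec.zeroExtend 32 b))).toInt ∧
      (v - BitVec.zeroExtend 32 (BitVec.setWidth 8 (BitVec.zeroExtend 32 b))).toInt ≤ 32 := by
  have hb := b.isLt
  have hL : (BitVec.zeroExtend 32 (BitVec.setWidth 8 (BitVec.zeroExtend 32 b))).toNat = b.toNat := by
    simp only [BitVec.zeroExtend, BitVec.toNat_setWidth]
    omega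
  generalize BitVec.zeroExtend 32 (BitVec.setWidth 8 (BitVec.zeroExtend 32 b)) = l at *
  have c1 := toInt_cases32 v
  have c2 := toInt_cases32 l
  have c3 := toInt_cases32 (v - l)
  have e3 := BitVec.toNat_sub v l
  omega

/-- **The exit assertion from its parts**: the walker's facts about the state at the exit join, the carried memory facts, the
result in r12d. -/
theorem exit_of {others : List Obj} {frames : List (Nat × FrameLayout)} {Blk : Block → Prop} {len : Nat} {u₀ : State}
    {ret : Word} {e v : State} {f c : Nat}
    (hrip : v.rip = L.codebook_decode_scalar_raw.cut5)
    (he : AtEntry (conv u₀) L.codebook_decode_scalar_raw.entry (codebook_decode_scalar_raw.spec others frames Blk len).frame ret e)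
    (hrsp : v.reg .rsp = e.reg .rsp - 88) (hC : Carried others frames Blk len ret e f v.mem)
    (hf : (e.reg .rdi).toNat = f) (hc : (e.reg .rsi).toNat = c) (hcode : CodeOK u₀ v.mem) (hinv : abiInv v)
    (hhi : (v.reg .r12).toNat < 2 ^ 32) (hres : DecodeRawResult e.mem c (argInt (v.reg .r12))) :
    ScalarRaw.AtExit others frames Blk len u₀ ret e v := by
  refine ⟨hrip, ⟨he, hrsp, hC.ra, hC.r15, hC.r14, hC.r13, hC.r12, hC.rbp, hC.rbx, hC.same, hcode, hinv, hC.untouched⟩, ?_, hhi, ?_⟩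
  · rw [hf]
    exact hC.reader
  · rw [hc]
    exact hres

/-! ### The loop head -/

/-- **10D66DH, the head of the binary search** (stb_vorbis_fixed.c:1698 `while (n > 1)`), for the walk that began at the state
`u` of the segment's entry assertion: `x` = r12d, `n` = r13d with BS; rbp = c; the memory differs from that of `u` only in three
slots of the own frame (the return address of a call, `[rsp+10H]` = acc, `[rsp+18H]` = code). -/
structure AtSearchHead (others : List Obj) (frames : List (Nat × FrameLayout)) (Blk : Block → Prop) (len : Nat) (u₀ : State)
    (ret : Word) (e u : State) (x n : Nat) (s : State) : Prop where
  bin : ScalarRaw.AtBinary others frames Blk len u₀ ret e u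
  rip : s.rip = L.codebook_decode_scalar_raw.loop1
  rsp : s.reg .rsp = e.reg .rsp - 88
  rbp : s.reg .rbp = e.reg .rsi
  r12 : s.reg .r12 = addr x
  r13 : s.reg .r13 = addr n
  bs : BS x n (Codebook.sorted_entries u.mem (e.reg .rsi).toNat).toNat
  same : Mem.SameExcept [⟨(e.reg .rsp).toNat - 96, (e.reg .rsp).toNat - 88⟩, ⟨(e.reg .rsp).toNat - 72, (e.reg .rsp).toNat - 68⟩,
    ⟨(e.reg .rsp).toNat - 64, (e.reg .rsp).toNat - 60⟩] u.mem s.mem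
  untouched : ShadowUntouched u.mem s.mem
  code : Mem.EqOn L.textLo L.textHi u₀.mem s.mem
  inv : abiInv s

/-! ### The walk, stages 1 and 2 -/

/-- **Before the binary search** (10D62EH … 10D667H, stb_vorbis_fixed.c:1695 – 1696): `code = bit_reverse(f->acc)` (a checked load of
`f->acc`, spilled to `[rsp+10H]`; the call; the result spilled to `[rsp+18H]`), `n = c->sorted_entries` (checked), `x = 0`: the loop
head with BS `0 se se`. -/
theorem pre_ok (Lay : Layout) (hLay : Lay.hi = 0x1000000) (μ : Microarch) (hμ : UserX.MicroOK μ) (u₀ : State)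
    (hcode : HasCodeNat Lay u₀ Vorbis.L.codebook_decode_scalar_raw.entry Vorbis.Code.code_codebook_decode_scalar_raw.nat
      Vorbis.L.codebook_decode_scalar_raw.size)
    (hload4 : Asan.SmallCheck Lay μ Vorbis.WayInv (Vorbis.CodeOK u₀) [.rax, .rcx, .rdx] 4 Vorbis.L.__asan_load4_noabort.entry)
    (others : List Obj) (frames : List (Nat × FrameLayout))
    (hbr : Calls Lay μ Vorbis.WayInv (Vorbis.conv u₀) Vorbis.L.bit_reverse.entry (Vorbis.Spec.bit_reverse.spec others frames))
    (Blk : Block → Prop) (len : Nat) (ret : Word) (e u : State)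
    (hat : ScalarRaw.AtBinary others frames Blk len u₀ ret e u) :
    ReachVia Lay μ WayInv u (fun s => ∃ x n, AtSearchHead others frames Blk len u₀ ret e u x n s) := by
  have hbin0 := hat
  obtain ⟨hrip, hcommon, hc, hf, hsne⟩ := hat
  obtain ⟨hmid, hpre, hreader, hcb, hapart⟩ := hcommon
  have he := hmid.atEntry
  have hun := hmid.untouched
  have hrsp := hmid.rsp
  have hcodeok := hmid.code
  have hinv := hmid.inv
  clear hmid
  v_entry he
  -- the ghosts: `f`, `c` as numbers
  obtain ⟨f, hfn⟩ : ∃ f : Nat, (e.reg .rdi).toNat = f := ⟨_, rfl⟩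
  obtain ⟨c, hcn⟩ : ∃ c : Nat, (e.reg .rsi).toNat = c := ⟨_, rfl⟩
  have hrdi : e.reg .rdi = addr f := eq_addr _ _ hfn
  have hrsi : e.reg .rsi = addr c := eq_addr _ _ hcn
  have hF := facts_of hpre hfn hcn he_room he_top he_align
  have hsh := hpre.reader.shadow
  have hL := hpre.reader.env.live
  have hok := hpre.ok
  obtain ⟨Bc, hBc, hinc⟩ := hpre.book
  rw [hfn] at hreader hapart
  rw [hcn] at hsne hcb hapart hinc
  rw [hrdi] at hf
  have hbits := hreader.bits
  have hoc := hF.book_off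
  have hcw : 0x119d40 ≤ c ∧ c + 2120 ≤ 0xC00000 := ⟨hF.book_lo, hF.book_hi⟩
  have hof := hF.geo.obj_off
  have hfw : 0x119d40 ≤ f ∧ f + 1808 ≤ 0xC00000 := ⟨hF.obj_lo, hF.geo.obj_hi⟩
  -- the number of sorted entries
  have hse1 : 1 ≤ Codebook.sorted_entries u.mem c := (hcb.sorted_codewords_ne_zero_iff hok).mp hsne
  obtain ⟨se, hse⟩ : ∃ se : Nat, Codebook.sorted_entries u.mem c = (se : Int) :=
    ⟨(Codebook.sorted_entries u.mem c).toNat, by omega⟩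
  have hse_lt : se < 16777216 := by
    have h1 := hcb.K2.se_le
    have h2 := hcb.K1.ent_lt
    omega
  have hse_pos : 1 ≤ se := by omega
  have r_se : u.mem.readLE (addr c + 2112) 4 = se := by
    have h := hse
    simp only [vacc, voff] at h
    have := u.mem.i32_cases (c + 2112)
    simp only [vfield]
    omega
  have w_rip := hrip
  have w_rsp := hrsp
  have h_rbp : u.reg .rbp = addr c := by rw [hc, hrsi]
  have w_eq : Mem.EqOn Vorbis.L.textLo Vorbis.L.textHi u₀.mem u.mem := hcodeok
  have hdf : u.flags .df = false := (show abiInv _ from hinv).1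
  have hmx : u.mxcsr &&& 0x1F80 = 0x1F80 := (show abiInv _ from hinv).2
  have hsse := Vorbis.sseOK_of_abiInv hinv
  u_walk hcode [hμ.vendor] until [Vorbis.L.codebook_decode_scalar_raw.cut3] span [Vorbis.L.textLo, Vorbis.L.textHi] side (v_side)
  case check_10d63a =>
    -- 0x10d63a, load4 [f + 0x6e4] (`f->acc`): a field of `*f`
    have hu1 : ShadowUntouched u.mem s_10d63a.mem := by v_untouched
    have hs := hbits.site_field hL 1764 4 (by omega) (by omega) rfl
    exact check_site hsh.inv (Mem.EqOn.trans hun hu1) hs (by u_omega)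
  case call_inv =>
    v_inv
  case pre_10d64b =>
    -- bit_reverse's precondition: the shadow clause at its entry
    have hu1 : ShadowUntouched u.mem s_10d64b.mem := by v_untouched
    show ShadowPre others frames s_10d64b
    refine hsh.call (Mem.EqOn.trans hun hu1) ?_ ?_ ?_
    · rw [w_rsp]
      u_omega
    · rw [w_rsp]
      u_omega
    · rw [w_rsp]
      u_omega
  -- 0x10d650, after bit_reverse: the memory is that of its entry
  v_after_call w_rsp_10d64b w_mem_10d64b
  have w_mem : s_10d64br.mem = _ := w_post.trans w_mem_10d64b
  obtain ⟨code, w_rax⟩ : ∃ z, s_10d64br.reg .rax = z := ⟨_, rfl⟩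
  clear w_same w_post
  u_walk hcode [hμ.vendor] until [Vorbis.L.codebook_decode_scalar_raw.loop1] span [Vorbis.L.textLo, Vorbis.L.textHi] side (v_side)
  case check_10d65b =>
    -- 0x10d65b, load4 [c + 0x840] (`c->sorted_entries`): a field of `*c`
    have hu1 : ShadowUntouched u.mem s_10d65b.mem := by v_untouched
    have hs := Codebook.site_field hL hBc hinc 2112 4 (by simp only [voff]; omega) (by omega) rfl
    exact check_site hsh.inv (Mem.EqOn.trans hun hu1) hs (by u_omega)
  -- 0x10d66d, the loop head (stb_vorbis_fixed.c:1698 `while (n > 1)`): x = 0, n = se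
  refine ReachVia.done ⟨0, se, hbin0, w_rip, w_rsp, ?_, ?_, ?_, ?_, ?_, ?_, w_eq, ?_⟩
  · rw [w_kept .rbp rfl]
    exact hc
  · rw [w_r12, ofBV_eq_addr _ (by decide)]
    rfl
  · rw [w_r13, ofBV_eq_addr _ (by decide), toNat_ofNat32 _ (by omega)]
  · rw [hcn, hse, Int.toNat_natCast]
    exact BS.init hse_pos
  · u_same
  · v_untouched
  · v_inv

/-- **The binary search** (10D66DH … 10D6E5H, stb_vorbis_fixed.c:1698 – 1706): from the loop head with any `x`, `n` (BS) to the loop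
head with `n = 1`. Measure `n` = r13d. Two check sites: the field `c->sorted_codewords` and the probe `sorted_codewords[m]`,
`m = x + n / 2 < se` by BS. -/
theorem loop_ok (Lay : Layout) (hLay : Lay.hi = 0x1000000) (μ : Microarch) (hμ : UserX.MicroOK μ) (u₀ : State)
    (hcode : HasCodeNat Lay u₀ Vorbis.L.codebook_decode_scalar_raw.entry Vorbis.Code.code_codebook_decode_scalar_raw.nat
      Vorbis.L.codebook_decode_scalar_raw.size)
    (hload4 : Asan.SmallCheck Lay μ Vorbis.WayInv (Vorbis.CodeOK u₀) [.rax, .rcx, .rdx] 4 Vorbis.L.__asan_load4_noabort.entry)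
    (hload8 : Asan.SmallCheck Lay μ Vorbis.WayInv (Vorbis.CodeOK u₀) [.rax, .rcx, .rdx] 8 Vorbis.L.__asan_load8_noabort.entry)
    (others : List Obj) (frames : List (Nat × FrameLayout)) (Blk : Block → Prop) (len : Nat) (ret : Word) (e u : State)
    (x n : Nat) (s : State) (hat : AtSearchHead others frames Blk len u₀ ret e u x n s) :
    ReachVia Lay μ WayInv s (fun v => ∃ x', AtSearchHead others frames Blk len u₀ ret e u x' 1 v) := by
  obtain ⟨hbin, w_rip, h_rsp, hrbp, hx, hn, hBS, hsameS, hunS, w_eq, hinvS⟩ := hat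
  have hbin0 := hbin
  obtain ⟨-, hcommon, -, hf, hsne⟩ := hbin
  obtain ⟨hmid, hpre, hreader, hcb, hapart⟩ := hcommon
  have he := hmid.atEntry
  have hun := hmid.untouched
  clear hmid
  v_entry he
  -- the ghosts: `f`, `c` as numbers
  obtain ⟨f, hfn⟩ : ∃ f : Nat, (e.reg .rdi).toNat = f := ⟨_, rfl⟩
  obtain ⟨c, hcn⟩ : ∃ c : Nat, (e.reg .rsi).toNat = c := ⟨_, rfl⟩
  have hrdi : e.reg .rdi = addr f := eq_addr _ _ hfn
  have hrsi : e.reg .rsi = addr c := eq_addr _ _ hcn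
  have hF := facts_of hpre hfn hcn he_room he_top he_align
  have hsh := hpre.reader.shadow
  have hL := hpre.reader.env.live
  have hok := hpre.ok
  obtain ⟨Bc, hBc, hinc⟩ := hpre.book
  rw [hfn] at hreader hapart
  rw [hcn] at hsne hcb hapart hinc hBS
  have hoc := hF.book_off
  have hcw : 0x119d40 ≤ c ∧ c + 2120 ≤ 0xC00000 := ⟨hF.book_lo, hF.book_hi⟩
  -- the number of sorted entries
  have hse1 : 1 ≤ Codebook.sorted_entries u.mem c := (hcb.sorted_codewords_ne_zero_iff hok).mp hsne
  obtain ⟨se, hse⟩ : ∃ se : Nat, Codebook.sorted_entries u.mem c = (se : Int) :=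
    ⟨(Codebook.sorted_entries u.mem c).toNat, by omega⟩
  have hse_lt : se < 16777216 := by
    have h1 := hcb.K2.se_le
    have h2 := hcb.K1.ent_lt
    omega
  rw [hse, Int.toNat_natCast] at hBS
  -- the table of sorted codewords: `se + 1` words off the frame
  obtain ⟨scw, hscw⟩ : ∃ scw : Nat, Codebook.sorted_codewords u.mem c = scw := ⟨_, rfl⟩
  have r_scw_u : u.mem.readLE (addr c + 2096) 8 = scw := by
    rw [← hscw]
    simp only [vfield, vacc, voff]
  have hscblk := hcb.K4.sc hse1
  rw [hscw, hse, Int.toNat_natCast] at hscblk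
  have hwsc := hF.blk_off _ scw (4 * (se + 1)) hscblk (by omega) ⟨Nat.le_refl _, Nat.le_refl _⟩
  have h_rbp : s.reg .rbp = addr c := by rw [hrbp, hrsi]
  have hdf : s.flags .df = false := (show abiInv _ from hinvS).1
  have hmx : s.mxcsr &&& 0x1F80 = 0x1F80 := (show abiInv _ from hinvS).2
  clear hinvS hrbp
  u_loop [x, n] (fun v => (v.reg .r13).toNat)
  have hpos := hBS.pos
  have hle := hBS.le
  by_cases hn1 : n ≤ 1
  · -- `n = 1`: the search is over, nothing is stepped
    have e1 : n = 1 := by omega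
    subst e1
    refine ReachVia.done (Or.inl ⟨x, hbin0, w_rip, h_rsp, ?_, hx, hn, ?_, hsameS, hunS, w_eq, Vorbis.abiInv_of hdf hmx⟩)
    · rw [h_rbp, hrsi]
    · rw [hcn, hse, Int.toNat_natCast]
      exact hBS
  -- `n ≥ 2`: one round. The walker's forms of `n >> 1`, `m = x + (n >> 1)` and of the probe's address, as numbers
  have e_cmp : (Word.part .w32 (addr n)).toInt = (n : Int) := part32_addr_toInt n (by omega)
  have e14 : Word.ofBV ((Word.part .w32 (addr n)).sshiftRight 1) = addr (n / 2) := sar1_addr n (by omega)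
  have e15 : Word.ofBV (BitVec.setWidth 32 (addr (n / 2) + addr x).toBitVec) = addr (n / 2 + x) :=
    lea32_addr (n / 2) x (by omega)
  have ea : (Word.ofBV (BitVec.signExtend 64 (Word.part .w32 (addr (n / 2 + x)))) <<< 2 + UInt64.ofNat scw).toNat =
      scw + 4 * (n / 2 + x) := elem4_toNat (n / 2 + x) scw (by omega) (by omega)
  have r_scw : s.mem.readLE (addr c + 2096) 8 = scw := by u_frame r_scw_u
  u_walk hcode [hμ.vendor, e14, e15] until [Vorbis.L.codebook_decode_scalar_raw.loop1, Vorbis.L.codebook_decode_scalar_raw.ret11] span [Vorbis.L.textLo, Vorbis.L.textHi] side (v_side)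
  case check_10d684 =>
    -- 0x10d684, load8 [c + 0x830] (`c->sorted_codewords`): a field of `*c`
    have hu1 : ShadowUntouched u.mem s_10d684.mem := by v_untouched
    have hs := Codebook.site_field hL hBc hinc 2096 8 (by simp only [voff]; omega) (by omega) rfl
    exact check_site hsh.inv (Mem.EqOn.trans hun hu1) hs (by u_omega)
  case check_10d69a =>
    -- 0x10d69a, load4 [sorted_codewords + 4 m]: `m = x + n / 2 < se` (BS)
    have hu1 : ShadowUntouched u.mem s_10d69a.mem := by v_untouched
    have hm : ((n / 2 + x : Nat) : Int) ≤ Codebook.sorted_entries u.mem c := by omega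
    have hs := hcb.site_sorted_codewords hL (n / 2 + x) hm hse1
      (a := scw + 4 * (n / 2 + x)) (by simp only [Codebook.sorted_codewords_at, hscw])
    exact check_site hsh.inv (Mem.EqOn.trans hun hu1) hs ea
  · -- the exit arm `n ≤ 1` is not taken here
    exfalso
    rw [e_cmp] at hbr_10d671
    have e1 : (1#32).toInt = 1 := by decide
    omega
  · -- the back edge 0x10d6e5 (`x = m ; n -= n >> 1`)
    u_loop_back [n / 2 + x, n - n / 2]
    · rw [w_r12]
      exact mov32_addr _ (by omega)
    · rw [w_r13]
      exact sub32_addr n (n / 2) (by omega) (by omega)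
    · v_untouched
    · have hr := hBS.right (by omega)
      rw [Nat.add_comm] at hr
      exact hr
    · rw [w_kept .rbp rfl]
      exact h_rbp
    · rw [w_flags]
      simp only [X86.User.df_setStatus]
      exact w_df_10d69a
    · rw [w_mxcsr]
      exact hmx
    · rw [w_r13, sub32_addr n (n / 2) (by omega) (by omega), toNat_addr _ (by omega), toNat_addr _ (by omega)]
      omega
  · -- the back edge 0x10d6aa (`n >>= 1`)
    u_loop_back [x, n / 2]
    · rw [w_kept .r12 rfl]
      exact hx
    · rw [w_r13]
      exact mov32_addr _ (by omega)
    · v_untouched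
    · exact hBS.left (by omega)
    · rw [w_kept .rbp rfl]
      exact h_rbp
    · rw [w_flags]
      simp only [X86.User.df_setStatus]
      exact w_df_10d69a
    · rw [w_mxcsr]
      exact hmx
    · rw [w_r13, mov32_addr _ (by omega), toNat_addr _ (by omega), toNat_addr _ (by omega)]
      omega

end Vorbis.Spec.codebook_decode_scalar_raw_2
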